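-- pv_equiv track=rewrite | github.com/lorenzoluc/GraphAnalyse | functions/conditions.py | verify_contiguous
-- ===== SOURCE A (Python) =====
-- from collections import defaultdict, deque
--
-- def verify_contiguous(space):
--     space_set = {(j['x'], j['y']) for j in space}
--     direction = [(-1, 0), (1, 0), (0, -1), (0, 1)]
--
--     # BFS
--     visited = set()
--     line = deque([(space[0]['x'], space[0]['y'])])
--     visited.add((space[0]['x'], space[0]['y']))
--
--     while line:
--         x, y = line.popleft()
--
--         for dx, dy in direction:
--             nx, ny = x + dx, y + dy
--             if (nx, ny) in space_set and (nx, ny) not in visited: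
--                 visited.add((nx, ny))
--                 line.append((nx, ny))
--
--
--
--
--     return len(visited) == len(space_set)
-- ===== SOURCE B (Python) =====
-- def verify_contiguous(space):
--     space_set = {(j['x'], j['y']) for j in space}
--     start = (space[0]['x'], space[0]['y'])
--     dirs = [(-1, 0), (1, 0), (0, -1), (0, 1)]
--
--     # round-based saturation: sweep the cell set, absorbing every cell
--     # adjacent to the region, until a sweep adds nothing
--     region = {start}
--     while True:
--         new = {c for c in space_set
--                if c not in region
--                and any((c[0] - dx, c[1] - dy) in region for dx, dy in dirs)}
--         if not new:
--             return len(region) == len(space_set)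
--         region |= new
-- ===== Notes on version B (the rewrite author's own statement) =====
-- stated objective: alternative
-- what changed: The explicit-queue BFS with a visited set is replaced by a queue-free round-based saturation: repeatedly sweep the whole cell set and absorb every cell adjacent to the grown region, until a sweep adds nothing.
import Mathlib
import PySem

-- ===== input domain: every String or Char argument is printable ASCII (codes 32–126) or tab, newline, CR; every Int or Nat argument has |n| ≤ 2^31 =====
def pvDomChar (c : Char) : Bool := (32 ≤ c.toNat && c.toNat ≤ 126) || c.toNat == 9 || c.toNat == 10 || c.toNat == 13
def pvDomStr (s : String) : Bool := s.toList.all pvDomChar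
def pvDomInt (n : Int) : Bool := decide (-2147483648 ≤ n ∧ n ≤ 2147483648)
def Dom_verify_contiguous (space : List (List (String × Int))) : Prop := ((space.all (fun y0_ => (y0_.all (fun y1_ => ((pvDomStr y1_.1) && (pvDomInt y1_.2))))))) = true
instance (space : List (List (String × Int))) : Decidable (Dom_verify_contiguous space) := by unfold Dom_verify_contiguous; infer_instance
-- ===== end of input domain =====

-- B replaces A's explicit-queue BFS by a queue-free round-based saturation of the region
-- (alternative decomposition, same result; not claimed faster).

-- ===== PORT A =====
-- j['x'], j['y']: first-match dict lookup. Pre_ guarantees both keys are present, so the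
-- `.getD 0` default never fires on admitted inputs (a missing key is Python's KeyError,
-- excluded by Pre_). Used by both ports, as both Pythons extract coordinates identically.
def pvCoord (j : List (String × Int)) : Int × Int :=
  (((j.find? (fun p => p.1 == "x")).map Prod.snd).getD 0,
   ((j.find? (fun p => p.1 == "y")).map Prod.snd).getD 0)

def pvDirs : List (Int × Int) := [(-1, 0), (1, 0), (0, -1), (0, 1)]

-- body of A's `for dx, dy in direction` loop, for one direction; state = (visited, line)
def pvBFSdir (cells : List (Int × Int)) (xy : Int × Int)
    (st : List (Int × Int) × List (Int × Int)) (d : Int × Int) :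
    List (Int × Int) × List (Int × Int) :=
  let n : Int × Int := (xy.1 + d.1, xy.2 + d.2)
  if n ∈ cells ∧ n ∉ st.1 then (PySem.Set.add st.1 n, st.2 ++ [n]) else st

-- termination measure for A's while loop (not part of the algorithm)
def pvBFSmeas (cells visited line : List (Int × Int)) : Nat :=
  2 * (cells.filter (fun c => !(visited.contains c))).length + line.length

theorem pv_filter_length_le {α : Type} (l : List α) (p q : α → Bool)
    (h : ∀ a ∈ l, q a = true → p a = true) :
    (l.filter q).length ≤ (l.filter p).length := by
  induction l with
  | nil => simp
  | cons x xs ih =>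
    have ih' := ih (fun a ha => h a (List.mem_cons_of_mem _ ha))
    simp only [List.filter_cons]
    by_cases hq : q x = true
    · rw [hq, h x (List.mem_cons_self) hq]; simpa using Nat.succ_le_succ ih'
    · rw [Bool.eq_false_iff.mpr hq]
      cases hp : p x <;> simp <;> omega

theorem pv_filter_length_lt {α : Type} (l : List α) (p q : α → Bool)
    (h : ∀ a ∈ l, q a = true → p a = true)
    (a : α) (ha : a ∈ l) (hp : p a = true) (hq : q a = false) :
    (l.filter q).length < (l.filter p).length := by
  induction l with
  | nil => simp at ha
  | cons x xs ih =>
    have hle := pv_filter_length_le xs p q (fun b hb => h b (List.mem_cons_of_mem _ hb))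
    simp only [List.filter_cons]
    rcases List.mem_cons.mp ha with rfl | ha'
    · rw [hq, hp]; simpa using Nat.lt_succ_of_le hle
    · have ih' := ih (fun b hb => h b (List.mem_cons_of_mem _ hb)) ha'
      by_cases hqx : q x = true
      · rw [hqx, h x (List.mem_cons_self) hqx]; simpa using Nat.succ_lt_succ ih'
      · rw [Bool.eq_false_iff.mpr hqx]
        cases hpx : p x <;> simp <;> omega

theorem pvBFSdir_meas (cells : List (Int × Int)) (xy : Int × Int)
    (st : List (Int × Int) × List (Int × Int)) (d : Int × Int) :
    pvBFSmeas cells (pvBFSdir cells xy st d).1 (pvBFSdir cells xy st d).2 ≤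
      pvBFSmeas cells st.1 st.2 := by
  by_cases hcond : (xy.1 + d.1, xy.2 + d.2) ∈ cells ∧ (xy.1 + d.1, xy.2 + d.2) ∉ st.1
  · obtain ⟨hc, hnv⟩ := hcond
    simp only [pvBFSdir, if_pos (And.intro hc hnv)]
    simp only [pvBFSmeas, PySem.Set.add_of_not_mem hnv, List.length_append,
      List.length_cons, List.length_nil]
    have hlt : (cells.filter (fun c => !((st.1 ++ [(xy.1 + d.1, xy.2 + d.2)]).contains c))).length <
        (cells.filter (fun c => !(st.1.contains c))).length := by
      refine pv_filter_length_lt cells (fun c => !(st.1.contains c))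
        (fun c => !((st.1 ++ [(xy.1 + d.1, xy.2 + d.2)]).contains c)) ?_ _ hc ?_ ?_
      · intro a _ hqa
        simp only [List.contains_eq_mem, Bool.not_eq_true', decide_eq_false_iff_not,
          List.mem_append, not_or] at hqa ⊢
        exact hqa.1
      · simp only [List.contains_eq_mem, Bool.not_eq_true', decide_eq_false_iff_not]
        exact hnv
      · simp [List.contains_eq_mem]
    omega
  · simp only [pvBFSdir, if_neg hcond]
    exact le_refl _

theorem pvBFSfold_meas (cells : List (Int × Int)) (xy : Int × Int)
    (l : List (Int × Int)) (st : List (Int × Int) × List (Int × Int)) :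
    pvBFSmeas cells (l.foldl (pvBFSdir cells xy) st).1 (l.foldl (pvBFSdir cells xy) st).2 ≤
      pvBFSmeas cells st.1 st.2 := by
  induction l generalizing st with
  | nil => exact le_refl _
  | cons d ds ih =>
    exact le_trans (ih (pvBFSdir cells xy st d)) (pvBFSdir_meas cells xy st d)

-- A's while loop: pop the head of `line`, fold the four directions, recurse
def pvBFS (cells : List (Int × Int)) : List (Int × Int) → List (Int × Int) → List (Int × Int)
  | visited, [] => visited
  | visited, xy :: rest =>
    let st := pvDirs.foldl (pvBFSdir cells xy) (visited, rest)
    pvBFS cells st.1 st.2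
termination_by visited line => pvBFSmeas cells visited line
decreasing_by
  calc pvBFSmeas cells (pvDirs.foldl (pvBFSdir cells xy) (visited, rest)).1
        (pvDirs.foldl (pvBFSdir cells xy) (visited, rest)).2
      ≤ pvBFSmeas cells visited rest := pvBFSfold_meas cells xy pvDirs (visited, rest)
    _ < pvBFSmeas cells visited (xy :: rest) := by
        simp only [pvBFSmeas, List.length_cons]; omega

def verify_contiguous (space : List (List (String × Int))) : Bool :=
  let cells := PySem.Set.ofList (space.map pvCoord)
  match space with
  | [] => false   -- Python raises IndexError at space[0]; excluded by Pre_
  | j :: _ =>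
    let s := pvCoord j
    (pvBFS cells (PySem.Set.add PySem.Set.empty s) [s]).length == cells.length

-- ===== PORT B =====
-- one sweep of B's while loop: the cells not yet in the region that touch it
def pvGrow (cells region : List (Int × Int)) : List (Int × Int) :=
  cells.filter (fun c => !(region.contains c) &&
    pvDirs.any (fun d => region.contains (c.1 - d.1, c.2 - d.2)))

def pvSaturate (cells : List (Int × Int)) (region : List (Int × Int)) : List (Int × Int) :=
  let nw := pvGrow cells region
  if nw = [] then region else pvSaturate cells (PySem.Set.union region nw)
termination_by (cells.filter (fun c => !(region.contains c))).length
decreasing_by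
  next hne =>
  match hmem : pvGrow cells region with
  | [] => exact absurd hmem hne
  | c :: cs =>
    have hc : c ∈ pvGrow cells region := by rw [hmem]; exact List.mem_cons_self
    have hcell : c ∈ cells := List.mem_of_mem_filter hc
    have hfc := List.of_mem_filter hc
    simp only [Bool.and_eq_true, List.contains_eq_mem, Bool.not_eq_true',
      decide_eq_false_iff_not] at hfc
    refine pv_filter_length_lt cells (fun a => !(region.contains a))
      (fun a => !((PySem.Set.union region (c :: cs)).contains a)) ?_ c hcell ?_ ?_
    · intro a _ hqa
      simp only [Bool.not_eq_true'] at hqa ⊢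
      have hnu : a ∉ PySem.Set.union region (c :: cs) := by simpa using hqa
      have : a ∉ region := fun hmem' => hnu ((PySem.Set.mem_union _ _ _).mpr (Or.inl hmem'))
      simpa using this
    · simp only [Bool.not_eq_true']
      simpa using hfc.1
    · simp only [Bool.not_eq_false']
      simpa using (PySem.Set.mem_union region (c :: cs) c).mpr (Or.inr List.mem_cons_self)

def verify_contiguous_alt (space : List (List (String × Int))) : Bool :=
  let cells := PySem.Set.ofList (space.map pvCoord)
  match space with
  | [] => false   -- space[0] raises IndexError in B too; excluded by Pre_
  | j :: _ =>
    (pvSaturate cells (PySem.Set.add PySem.Set.empty (pvCoord j))).length == cells.length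

-- ===== PRECONDITION & SPEC =====
-- Pre_ excludes exactly the inputs where both Pythons raise: IndexError on empty `space`
-- (space[0]) and KeyError when some cell dict lacks the key 'x' or 'y'.
def Pre_verify_contiguous (space : List (List (String × Int))) : Prop :=
  space ≠ [] ∧ ∀ j ∈ space, "x" ∈ j.map Prod.fst ∧ "y" ∈ j.map Prod.fst
instance (space : List (List (String × Int))) : Decidable (Pre_verify_contiguous space) := by
  unfold Pre_verify_contiguous; infer_instance
def pvWitness_verify_contiguous : (List (List (String × Int))) := [[("x", 0), ("y", 0)]]

def Spec_verify_contiguous (space : List (List (String × Int))) (out : Bool) : Prop :=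
  out = verify_contiguous_alt space
instance (space : List (List (String × Int))) (out : Bool) : Decidable (Spec_verify_contiguous space out) := by
  unfold Spec_verify_contiguous; infer_instance

-- ===== CLAIM (what is proved, stated in full; the proofs are below) =====
def Claim_equal_verify_contiguous : Prop := ∀ (space : List (List (String × Int))), Dom_verify_contiguous space → Pre_verify_contiguous space → Spec_verify_contiguous space (verify_contiguous space)

-- ===== LEMMAS AND PROOFS =====

-- the adjacency relation both programs explore: one grid step into the cell set
def pvEdge (cells : List (Int × Int)) (a b : Int × Int) : Prop :=
  b ∈ cells ∧ ∃ d ∈ pvDirs, b = (a.1 + d.1, a.2 + d.2)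

def pvReach (cells : List (Int × Int)) (s p : Int × Int) : Prop :=
  Relation.ReflTransGen (pvEdge cells) s p

theorem pv_reach_mem (cells : List (Int × Int)) (s : Int × Int) (X : List (Int × Int))
    (hs : s ∈ X) (hcl : ∀ p ∈ X, ∀ q, pvEdge cells p q → q ∈ X) :
    ∀ p, pvReach cells s p → p ∈ X := by
  intro p h
  induction h with
  | refl => exact hs
  | tail _ e ih => exact hcl _ ih _ e

theorem pvFold_inv (cells : List (Int × Int)) (xy : Int × Int)
    (l : List (Int × Int)) (st : List (Int × Int) × List (Int × Int)) :
    (∀ p ∈ st.1, p ∈ (l.foldl (pvBFSdir cells xy) st).1) ∧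
    (∀ p ∈ st.2, p ∈ (l.foldl (pvBFSdir cells xy) st).2) ∧
    (∀ p ∈ (l.foldl (pvBFSdir cells xy) st).1,
      p ∈ st.1 ∨ (p ∈ cells ∧ ∃ d ∈ l, p = (xy.1 + d.1, xy.2 + d.2))) ∧
    (∀ p ∈ (l.foldl (pvBFSdir cells xy) st).2,
      p ∈ st.2 ∨ p ∈ (l.foldl (pvBFSdir cells xy) st).1) ∧
    (∀ p ∈ (l.foldl (pvBFSdir cells xy) st).1, p ∉ st.1 →
      p ∈ (l.foldl (pvBFSdir cells xy) st).2) ∧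
    (st.1.Nodup → (l.foldl (pvBFSdir cells xy) st).1.Nodup) ∧
    (∀ d ∈ l, (xy.1 + d.1, xy.2 + d.2) ∈ cells →
      (xy.1 + d.1, xy.2 + d.2) ∈ (l.foldl (pvBFSdir cells xy) st).1) := by
  induction l generalizing st with
  | nil =>
    refine ⟨fun p hp => hp, fun p hp => hp, fun p hp => Or.inl hp,
      fun p hp => Or.inl hp, fun p hp hnp => absurd hp hnp, fun h => h, ?_⟩
    intro d hd; simp at hd
  | cons d ds ih =>
    simp only [List.foldl_cons]
    obtain ⟨ih1, ih2, ih3, ih4, ih5, ih6, ih7⟩ := ih (pvBFSdir cells xy st d)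
    -- one-step facts about st1 := pvBFSdir cells xy st d
    have sub1 : ∀ p ∈ st.1, p ∈ (pvBFSdir cells xy st d).1 := by
      intro p hp
      by_cases hcond : (xy.1 + d.1, xy.2 + d.2) ∈ cells ∧ (xy.1 + d.1, xy.2 + d.2) ∉ st.1
      · simp only [pvBFSdir, if_pos hcond, PySem.Set.add_of_not_mem hcond.2]
        exact List.mem_append_left _ hp
      · simpa only [pvBFSdir, if_neg hcond] using hp
    have sub2 : ∀ p ∈ st.2, p ∈ (pvBFSdir cells xy st d).2 := by
      intro p hp
      by_cases hcond : (xy.1 + d.1, xy.2 + d.2) ∈ cells ∧ (xy.1 + d.1, xy.2 + d.2) ∉ st.1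
      · simp only [pvBFSdir, if_pos hcond]
        exact List.mem_append_left _ hp
      · simpa only [pvBFSdir, if_neg hcond] using hp
    have new3 : ∀ p ∈ (pvBFSdir cells xy st d).1,
        p ∈ st.1 ∨ (p ∈ cells ∧ p = (xy.1 + d.1, xy.2 + d.2)) := by
      intro p hp
      by_cases hcond : (xy.1 + d.1, xy.2 + d.2) ∈ cells ∧ (xy.1 + d.1, xy.2 + d.2) ∉ st.1
      · simp only [pvBFSdir, if_pos hcond, PySem.Set.add_of_not_mem hcond.2] at hp
        rcases List.mem_append.mp hp with h | h
        · exact Or.inl h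
        · exact Or.inr ⟨by rw [List.mem_singleton.mp h]; exact hcond.1, List.mem_singleton.mp h⟩
      · simp only [pvBFSdir, if_neg hcond] at hp
        exact Or.inl hp
    have new4 : ∀ p ∈ (pvBFSdir cells xy st d).2,
        p ∈ st.2 ∨ p ∈ (pvBFSdir cells xy st d).1 := by
      intro p hp
      by_cases hcond : (xy.1 + d.1, xy.2 + d.2) ∈ cells ∧ (xy.1 + d.1, xy.2 + d.2) ∉ st.1
      · simp only [pvBFSdir, if_pos hcond, PySem.Set.add_of_not_mem hcond.2] at hp ⊢
        rcases List.mem_append.mp hp with h | h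
        · exact Or.inl h
        · exact Or.inr (List.mem_append_right _ h)
      · simp only [pvBFSdir, if_neg hcond] at hp
        exact Or.inl hp
    have new5 : ∀ p ∈ (pvBFSdir cells xy st d).1, p ∉ st.1 →
        p ∈ (pvBFSdir cells xy st d).2 := by
      intro p hp hnp
      by_cases hcond : (xy.1 + d.1, xy.2 + d.2) ∈ cells ∧ (xy.1 + d.1, xy.2 + d.2) ∉ st.1
      · simp only [pvBFSdir, if_pos hcond, PySem.Set.add_of_not_mem hcond.2] at hp ⊢
        rcases List.mem_append.mp hp with h | h
        · exact absurd h hnp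
        · exact List.mem_append_right _ h
      · simp only [pvBFSdir, if_neg hcond] at hp
        exact absurd hp hnp
    have nd1 : st.1.Nodup → (pvBFSdir cells xy st d).1.Nodup := by
      intro h
      by_cases hcond : (xy.1 + d.1, xy.2 + d.2) ∈ cells ∧ (xy.1 + d.1, xy.2 + d.2) ∉ st.1
      · simp only [pvBFSdir, if_pos hcond, PySem.Set.add_of_not_mem hcond.2]
        refine List.Nodup.append h (List.nodup_singleton _) ?_
        intro a ha hb
        rw [List.mem_singleton] at hb
        subst hb
        exact hcond.2 ha
      · simpa only [pvBFSdir, if_neg hcond] using h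
    have n7 : (xy.1 + d.1, xy.2 + d.2) ∈ cells →
        (xy.1 + d.1, xy.2 + d.2) ∈ (pvBFSdir cells xy st d).1 := by
      intro hc
      by_cases hmem : (xy.1 + d.1, xy.2 + d.2) ∈ st.1
      · exact sub1 _ hmem
      · simp only [pvBFSdir, if_pos (And.intro hc hmem), PySem.Set.add_of_not_mem hmem]
        exact List.mem_append_right _ (List.mem_singleton_self _)
    refine ⟨fun p hp => ih1 p (sub1 p hp), fun p hp => ih2 p (sub2 p hp), ?_, ?_, ?_, ?_, ?_⟩
    · intro p hp
      rcases ih3 p hp with h | ⟨hc, d', hd', he⟩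
      · rcases new3 p h with h' | ⟨hc, he⟩
        · exact Or.inl h'
        · exact Or.inr ⟨hc, d, List.mem_cons_self, he⟩
      · exact Or.inr ⟨hc, d', List.mem_cons_of_mem _ hd', he⟩
    · intro p hp
      rcases ih4 p hp with h | h
      · rcases new4 p h with h' | h'
        · exact Or.inl h'
        · exact Or.inr (ih1 p h')
      · exact Or.inr h
    · intro p hp hnp
      by_cases hp1 : p ∈ (pvBFSdir cells xy st d).1
      · exact ih2 p (new5 p hp1 hnp)
      · exact ih5 p hp hp1
    · exact fun h => ih6 (nd1 h)
    · intro d' hd' hc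
      rcases List.mem_cons.mp hd' with rfl | hd'
      · exact ih1 _ (n7 hc)
      · exact ih7 d' hd' hc



theorem pvBFS_main (cells : List (Int × Int)) (s : Int × Int)
    (visited line : List (Int × Int))
    (hsub : ∀ p ∈ line, p ∈ visited)
    (hcl : ∀ p ∈ visited, p ∉ line → ∀ q, pvEdge cells p q → q ∈ visited)
    (hR : ∀ p ∈ visited, pvReach cells s p)
    (hnd : visited.Nodup) :
    (∀ p ∈ visited, p ∈ pvBFS cells visited line) ∧
    (∀ p ∈ pvBFS cells visited line, pvReach cells s p) ∧
    (∀ p ∈ pvBFS cells visited line, ∀ q, pvEdge cells p q → q ∈ pvBFS cells visited line) ∧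
    (pvBFS cells visited line).Nodup := by
  induction visited, line using pvBFS.induct cells with
  | case1 visited =>
    simp only [pvBFS]
    exact ⟨fun p hp => hp, hR, fun p hp q hq => hcl p hp (List.not_mem_nil) q hq, hnd⟩
  | case2 visited xy rest st ih =>
    simp only [pvBFS]
    obtain ⟨F1, F2, F3, F4, F5, F6, F7⟩ := pvFold_inv cells xy pvDirs (visited, rest)
    have hxyv : xy ∈ visited := hsub xy List.mem_cons_self
    have hsub' : ∀ p ∈ (pvDirs.foldl (pvBFSdir cells xy) (visited, rest)).2,
        p ∈ (pvDirs.foldl (pvBFSdir cells xy) (visited, rest)).1 := by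
      intro p hp
      rcases F4 p hp with h | h
      · exact F1 p (hsub p (List.mem_cons_of_mem _ h))
      · exact h
    have hcl' : ∀ p ∈ (pvDirs.foldl (pvBFSdir cells xy) (visited, rest)).1,
        p ∉ (pvDirs.foldl (pvBFSdir cells xy) (visited, rest)).2 →
        ∀ q, pvEdge cells p q → q ∈ (pvDirs.foldl (pvBFSdir cells xy) (visited, rest)).1 := by
      intro p hp hnp q hq
      by_cases hpv : p ∈ visited
      · by_cases hpxy : p = xy
        · subst hpxy
          obtain ⟨hqc, d, hd, he⟩ := hq
          rw [he]
          exact F7 d hd (he ▸ hqc)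
        · have hnr : p ∉ rest := fun h => hnp (F2 p h)
          have hnl : p ∉ xy :: rest := by
            simp only [List.mem_cons, not_or]; exact ⟨hpxy, hnr⟩
          exact F1 q (hcl p hpv hnl q hq)
      · exact absurd (F5 p hp hpv) hnp
    have hR' : ∀ p ∈ (pvDirs.foldl (pvBFSdir cells xy) (visited, rest)).1,
        pvReach cells s p := by
      intro p hp
      rcases F3 p hp with h | ⟨hc, d, hd, he⟩
      · exact hR p h
      · exact Relation.ReflTransGen.tail (hR xy hxyv) ⟨he ▸ hc, d, hd, he⟩
    obtain ⟨c1, c2, c3, c4⟩ := ih hsub' hcl' hR' (F6 hnd)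
    exact ⟨fun p hp => c1 p (F1 p hp), c2, c3, c4⟩


theorem pvSat_main (cells : List (Int × Int)) (s : Int × Int) (region : List (Int × Int))
    (hR : ∀ p ∈ region, pvReach cells s p)
    (hnd : region.Nodup) :
    (∀ p ∈ region, p ∈ pvSaturate cells region) ∧
    (∀ p ∈ pvSaturate cells region, pvReach cells s p) ∧
    (∀ p ∈ pvSaturate cells region, ∀ q, pvEdge cells p q → q ∈ pvSaturate cells region) ∧
    (pvSaturate cells region).Nodup := by
  induction region using pvSaturate.induct cells with
  | case1 region nw hnil =>
    rw [pvSaturate, if_pos hnil]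
    refine ⟨fun p hp => hp, hR, ?_, hnd⟩
    intro p hp q hq
    by_cases hqr : q ∈ region
    · exact hqr
    · exfalso
      obtain ⟨hqc, d, hd, he⟩ := hq
      have hq' : q ∈ pvGrow cells region := by
        apply List.mem_filter.mpr
        refine ⟨hqc, ?_⟩
        refine Bool.and_eq_true _ _ |>.mpr ⟨?_, ?_⟩
        · simp only [Bool.not_eq_true']
          simp [hqr]
        · apply List.any_eq_true.mpr
          refine ⟨d, hd, ?_⟩
          have : (q.1 - d.1, q.2 - d.2) = p := by
            rw [he]; exact Prod.ext (by ring) (by ring)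
          simp only [this]
          simpa using hp
      exact List.not_mem_nil (hnil ▸ (show q ∈ nw from hq'))
  | case2 region nw hne ih =>
    rw [pvSaturate, if_neg hne]
    have hR' : ∀ p ∈ PySem.Set.union region nw, pvReach cells s p := by
      intro p hp
      rcases (PySem.Set.mem_union _ _ _).mp hp with h | h
      · exact hR p h
      · have hpc : p ∈ cells := List.mem_of_mem_filter h
        have hf := List.of_mem_filter h
        obtain ⟨hnr, hany⟩ := (Bool.and_eq_true _ _).mp hf
        obtain ⟨d, hd, hmem⟩ := List.any_eq_true.mp hany
        have hrm : (p.1 - d.1, p.2 - d.2) ∈ region := by simpa using hmem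
        refine Relation.ReflTransGen.tail (hR _ hrm) ⟨hpc, d, hd, ?_⟩
        exact Prod.ext (by ring) (by ring)
    obtain ⟨c1, c2, c3, c4⟩ := ih hR' (PySem.Set.nodup_union _ _ hnd)
    exact ⟨fun p hp => c1 p ((PySem.Set.mem_union _ _ _).mpr (Or.inl hp)), c2, c3, c4⟩


theorem pv_core (cells : List (Int × Int)) (s : Int × Int) :
    (pvBFS cells [s] [s]).length = (pvSaturate cells [s]).length := by
  have hR1 : ∀ p ∈ ([s] : List (Int × Int)), pvReach cells s p := by
    intro p hp; rw [List.mem_singleton] at hp; subst hp; exact Relation.ReflTransGen.refl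
  obtain ⟨hA1, hA2, hA3, hA4⟩ := pvBFS_main cells s [s] [s]
    (fun p hp => hp) (by intro p hp hnp; exact absurd hp hnp) hR1 (List.nodup_singleton s)
  obtain ⟨hB1, hB2, hB3, hB4⟩ := pvSat_main cells s [s] hR1 (List.nodup_singleton s)
  have hsA : s ∈ pvBFS cells [s] [s] := hA1 s (List.mem_singleton_self s)
  have hsB : s ∈ pvSaturate cells [s] := hB1 s (List.mem_singleton_self s)
  have hmem : ∀ p, p ∈ pvBFS cells [s] [s] ↔ p ∈ pvSaturate cells [s] := by
    intro p
    constructor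
    · intro hp; exact pv_reach_mem cells s _ hsB hB3 p (hA2 p hp)
    · intro hp; exact pv_reach_mem cells s _ hsA hA3 p (hB2 p hp)
  exact ((List.perm_ext_iff_of_nodup hA4 hB4).mpr hmem).length_eq

-- ===== VERDICT (by name: the statement is the Claim_ definition above) =====
theorem verify_contiguous_spec : Claim_equal_verify_contiguous := by
  intro space _ _
  unfold Spec_verify_contiguous verify_contiguous verify_contiguous_alt
  cases space with
  | nil => rfl
  | cons j rest =>
    simp only
    have he : (PySem.Set.add PySem.Set.empty (pvCoord j) : List (Int × Int)) = [pvCoord j] := rfl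
    rw [he, pv_core (PySem.Set.ofList ((j :: rest).map pvCoord)) (pvCoord j)]
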